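-- pv_equiv track=rewrite | github.com/Nihad-droid/ICT | Task 8.py | non_zero__counter
-- ===== SOURCE A (Python) =====
-- def non_zero__counter(x):
--     count = 0
--     while x > 0:
--         d = x % 10
--         x //= 10
--         if d != 0:
--             count += 1
--     return count
-- ===== SOURCE B (Python) =====
-- def non_zero__counter(x):
--     if x > 0:
--         return sum(1 for c in str(x) if c != '0')
--     return 0
-- ===== Notes on version B (the rewrite author's own statement) =====
-- stated objective: idiomatic
-- what changed: B counts the non-zero characters of the decimal string representation instead of A's arithmetic modulus/division digit-extraction loop.
import Mathlib
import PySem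

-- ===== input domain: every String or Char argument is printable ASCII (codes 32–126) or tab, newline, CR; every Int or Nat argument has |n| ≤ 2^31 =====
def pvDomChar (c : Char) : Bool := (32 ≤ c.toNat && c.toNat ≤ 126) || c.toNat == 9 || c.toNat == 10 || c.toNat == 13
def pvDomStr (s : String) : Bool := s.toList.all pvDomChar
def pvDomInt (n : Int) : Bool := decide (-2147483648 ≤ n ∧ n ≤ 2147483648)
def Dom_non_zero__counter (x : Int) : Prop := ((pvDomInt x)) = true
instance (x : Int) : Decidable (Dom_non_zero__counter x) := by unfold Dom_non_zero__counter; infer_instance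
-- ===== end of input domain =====

-- B counts non-'0' characters of str(x); A extracts digits arithmetically. Proven equal for all Int inputs.

-- ===== PORT A =====
-- the while loop of A, with `count` as accumulator
def nzLoop (x count : Int) : Int :=
  if _h : x > 0 then
    let d := PySem.Int.mod x 10
    let x' := PySem.Int.floordiv x 10
    nzLoop x' (if d ≠ 0 then count + 1 else count)
  else count
termination_by x.toNat
decreasing_by
  simp only [PySem.Int.floordiv_eq_ediv_of_pos (a := x) (b := 10) (by omega)]
  omega

def non_zero__counter (x : Int) : Int := nzLoop x 0

-- ===== PORT B =====
def non_zero__counter_alt (x : Int) : Int :=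
  if x > 0 then ((PySem.Int.toStr x).toList.countP (fun c => c != '0') : Int) else 0

-- ===== PRECONDITION & SPEC =====
def Spec_non_zero__counter (x : Int) (out : Int) : Prop := out = non_zero__counter_alt x
instance (x : Int) (out : Int) : Decidable (Spec_non_zero__counter x out) := by unfold Spec_non_zero__counter; infer_instance

-- ===== CLAIM (what is proved, stated in full; the proofs are below) =====
def Claim_equal_non_zero__counter : Prop := ∀ (x : Int), Dom_non_zero__counter x → Spec_non_zero__counter x (non_zero__counter x)

-- ===== LEMMAS AND PROOFS =====

-- number of nonzero decimal digits of a natural number (0 has none)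
def countNZ : Nat → Nat
  | 0 => 0
  | n+1 => (if (n+1) % 10 = 0 then 0 else 1) + countNZ ((n+1)/10)
decreasing_by omega

theorem nzLoop_nonpos (x count : Int) (h : ¬ x > 0) : nzLoop x count = count := by
  rw [nzLoop]; simp [h]

theorem nzLoop_eq (n : Nat) : ∀ count : Int, nzLoop (n : Int) count = count + countNZ n := by
  induction n using Nat.strong_induction_on with
  | _ n ih =>
    intro count
    match n with
    | 0 => rw [nzLoop]; simp [countNZ]
    | m+1 =>
      rw [nzLoop]
      have hpos : ((m+1 : Nat) : Int) > 0 := by positivity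
      have hd : PySem.Int.floordiv ((m+1 : Nat) : Int) 10 = (((m+1)/10 : Nat) : Int) := by
        rw [PySem.Int.floordiv_eq_ediv_of_pos (by omega)]; omega
      have hm : PySem.Int.mod ((m+1 : Nat) : Int) 10 = (((m+1) % 10 : Nat) : Int) := by
        rw [PySem.Int.mod_eq_emod_of_pos (by omega)]; omega
      simp only [hpos, dif_pos, hd, hm]
      rw [ih ((m+1)/10) (by omega)]
      rw [countNZ]
      by_cases h0 : (m+1) % 10 = 0
      · simp [h0]
      · have hne : (((m+1) % 10 : Nat) : Int) ≠ 0 := by exact_mod_cast h0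
        rw [if_pos hne, if_neg h0]
        push_cast
        ring

theorem toDigitsCore_succ (b f n : Nat) (acc : List Char) :
    Nat.toDigitsCore b (f+1) n acc =
      if n / b = 0 then Nat.digitChar (n % b) :: acc
      else Nat.toDigitsCore b f (n/b) (Nat.digitChar (n % b) :: acc) := rfl

theorem digitChar_ne_zero (d : Nat) (h : d < 10) :
    ((Nat.digitChar d) != '0') = decide (d ≠ 0) := by
  interval_cases d <;> decide

theorem countP_toDigitsCore (f : Nat) : ∀ (n : Nat) (acc : List Char), n < f →
    (Nat.toDigitsCore 10 f n acc).countP (fun c => c != '0')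
      = countNZ n + acc.countP (fun c => c != '0') := by
  induction f with
  | zero => intro n acc h; omega
  | succ f ih =>
    intro n acc h
    rw [toDigitsCore_succ]
    by_cases hdiv : n / 10 = 0
    · rw [if_pos hdiv]
      match n, hdiv with
      | 0, _ => simp [countNZ, Nat.digitChar]
      | m+1, hdiv =>
        rw [List.countP_cons, countNZ, hdiv, countNZ]
        have hm : (m+1) % 10 = m+1 := Nat.mod_eq_of_lt (by omega)
        rw [digitChar_ne_zero _ (by omega)]
        simp [hm]
        omega
    · rw [if_neg hdiv]
      rw [ih (n/10) _ (by omega)]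
      match n, hdiv with
      | m+1, hdiv =>
        rw [List.countP_cons, countNZ]
        rw [digitChar_ne_zero _ (by omega)]
        by_cases h0 : (m+1) % 10 = 0 <;> simp [h0] <;> omega

theorem countP_toDigits (n : Nat) :
    (Nat.toDigits 10 n).countP (fun c => c != '0') = countNZ n := by
  rw [Nat.toDigits]
  rw [countP_toDigitsCore (n+1) n [] (by omega)]
  simp

-- ===== VERDICT (by name: the statement is the Claim_ definition above) =====
theorem non_zero__counter_spec : Claim_equal_non_zero__counter := by
  intro x _
  unfold Spec_non_zero__counter non_zero__counter non_zero__counter_alt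
  by_cases hx : x > 0
  · rw [if_pos hx]
    have hts : (PySem.Int.toStr x).toList = Nat.toDigits 10 x.toNat := by
      rw [PySem.Int.toList_toStr, PySem.Int.toChars]
      rw [if_neg (by omega)]
    rw [hts, countP_toDigits]
    have hxn : (x.toNat : Int) = x := Int.toNat_of_nonneg (by omega)
    calc nzLoop x 0 = nzLoop (x.toNat : Int) 0 := by rw [hxn]
      _ = 0 + countNZ x.toNat := nzLoop_eq x.toNat 0
      _ = (countNZ x.toNat : Int) := by ring
  · rw [if_neg hx, nzLoop_nonpos x 0 hx]
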